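-- pv_equiv track=rewrite | github.com/sandeeppathak16/LeetCode | Equal 0, 1 and 2 - GFG/equal-0-1-and-2.py | getSubstringWithEqual012
-- ===== SOURCE A (Python) =====
-- def getSubstringWithEqual012(Str):
--     # code here
--
--     d={}
--     d[(0, 0)]=1
--     count=0
--     zc, oc, tc = 0, 0, 0
--
--     for s in Str:
--
--         if s == '0':
--             zc+=1
--         elif s == '1':
--             oc+=1
--         else:
--             tc+=1
--         tmp=(zc-oc, zc-tc)
--
--         if tmp not in d:
--             count+=0
--         else:
--             count+=d[tmp]
--
--
--         if tmp in d:
--             d[tmp]=1+d[tmp]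
--         else:
--             d[tmp]=1
--     return count
-- ===== SOURCE B (Python) =====
-- def getSubstringWithEqual012(Str):
--     # Different algorithm: encode each prefix state (zc-oc, zc-tc) as a single
--     # integer, SORT the codes and scan runs of equal codes, adding v*(v-1)//2
--     # per run -- sort-then-scan instead of A's incremental hashmap counting.
--     n = len(Str)
--     base = 2 * n + 2          # |zc-oc|, |zc-tc| <= n, so the encoding is injective
--     zc = oc = tc = 0
--     codes = [0]               # code of the empty prefix (0, 0)
--     for s in Str:
--         if s == '0':
--             zc += 1
--         elif s == '1':
--             oc += 1
--         else:
--             tc += 1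
--         codes.append((zc - oc) * base + (zc - tc))
--     codes.sort()
--     total = 0
--     prev = None
--     run = 0
--     for c in codes:
--         if c == prev:
--             run += 1
--         else:
--             total += run * (run - 1) // 2
--             prev = c
--             run = 1
--     return total + run * (run - 1) // 2
-- ===== Notes on version B (the rewrite author's own statement) =====
-- stated objective: alternative
-- what changed: B replaces A's incremental prefix-state hashmap counting with a sort-then-scan algorithm: it encodes each prefix state (zc-oc, zc-tc) as one integer, sorts the code list, and sums v*(v-1)//2 over maximal runs of equal codes.
import Mathlib
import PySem

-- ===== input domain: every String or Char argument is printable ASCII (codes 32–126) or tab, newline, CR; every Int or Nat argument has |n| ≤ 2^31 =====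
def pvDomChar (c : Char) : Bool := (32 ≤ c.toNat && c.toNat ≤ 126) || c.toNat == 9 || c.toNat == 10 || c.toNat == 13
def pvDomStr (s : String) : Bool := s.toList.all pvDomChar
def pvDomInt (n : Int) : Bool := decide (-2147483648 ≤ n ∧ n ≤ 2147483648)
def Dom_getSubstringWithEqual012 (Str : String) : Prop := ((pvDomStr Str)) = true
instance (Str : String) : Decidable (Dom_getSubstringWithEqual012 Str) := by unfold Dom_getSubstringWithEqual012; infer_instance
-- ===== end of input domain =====

-- B replaces A's incremental prefix-state hashmap by a sort-then-scan algorithm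
-- (encode each prefix state as one integer, sort, sum v*(v-1)//2 over runs of equal codes).

-- ===== PORT A =====
-- A's loop state: (d, count, zc, oc, tc); one step per character, count accumulated in the loop.
def pvAStep (st : PySem.Dict (Int × Int) Int × Int × Int × Int × Int) (s : Char) :
    PySem.Dict (Int × Int) Int × Int × Int × Int × Int :=
  let d := st.1; let count := st.2.1; let zc := st.2.2.1; let oc := st.2.2.2.1; let tc := st.2.2.2.2
  let zc := if s = '0' then zc + 1 else zc
  let oc := if s = '0' then oc else if s = '1' then oc + 1 else oc
  let tc := if s = '0' then tc else if s = '1' then tc else tc + 1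
  let tmp : Int × Int := (zc - oc, zc - tc)
  -- 'count += d[tmp]' is only reached when tmp ∈ d, so d[tmp] = d.getD tmp 0 there
  let count := if d.contains tmp = false then count + 0 else count + d.getD tmp 0
  let d := if d.contains tmp then d.insert tmp (1 + d.getD tmp 0) else d.insert tmp 1
  (d, count, zc, oc, tc)

def getSubstringWithEqual012 (Str : String) : Int :=
  ((Str.toList.foldl pvAStep ((PySem.Dict.empty.insert (0, 0) 1), 0, 0, 0, 0)).2.1)

-- ===== PORT B =====
-- B's first loop: build the list of prefix-state codes (zc-oc)*base + (zc-tc).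
def pvBStep (base : Int) (st : List Int × Int × Int × Int) (s : Char) :
    List Int × Int × Int × Int :=
  let codes := st.1; let zc := st.2.1; let oc := st.2.2.1; let tc := st.2.2.2
  let zc := if s = '0' then zc + 1 else zc
  let oc := if s = '0' then oc else if s = '1' then oc + 1 else oc
  let tc := if s = '0' then tc else if s = '1' then tc else tc + 1
  (codes ++ [(zc - oc) * base + (zc - tc)], zc, oc, tc)

-- B's second loop: scan the sorted codes, closing a run when the code changes.
def pvScanStep (st : Int × Option Int × Int) (c : Int) : Int × Option Int × Int :=
  let total := st.1; let prev := st.2.1; let run := st.2.2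
  if prev == some c then (total, prev, run + 1)
  else (total + PySem.Int.floordiv (run * (run - 1)) 2, some c, 1)

def getSubstringWithEqual012_alt (Str : String) : Int :=
  let n : Int := PySem.Str.len Str
  let base := 2 * n + 2
  let codes := (Str.toList.foldl (pvBStep base) ([0], 0, 0, 0)).1
  let sortedCodes := PySem.List.sorted codes (fun x => x) false
  let fin := sortedCodes.foldl pvScanStep (0, none, 0)
  fin.1 + PySem.Int.floordiv (fin.2.2 * (fin.2.2 - 1)) 2

-- ===== PRECONDITION & SPEC =====
def Spec_getSubstringWithEqual012 (Str : String) (out : Int) : Prop := out = getSubstringWithEqual012_alt Str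
instance (Str : String) (out : Int) : Decidable (Spec_getSubstringWithEqual012 Str out) := by unfold Spec_getSubstringWithEqual012; infer_instance

-- ===== CLAIM (what is proved, stated in full; the proofs are below) =====
def Claim_equal_getSubstringWithEqual012 : Prop := ∀ (Str : String), Dom_getSubstringWithEqual012 Str → Spec_getSubstringWithEqual012 Str (getSubstringWithEqual012 Str)

-- ===== LEMMAS AND PROOFS =====

-- C(v,2), and its sum over the distinct elements of a list (the pair-count of a multiset)
def pvC2 (v : Int) : Int := PySem.Int.floordiv (v * (v - 1)) 2

def pvGroupsSum {α : Type} [BEq α] (l : List α) : Int :=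
  ((PySem.List.dedup l).map (fun k => pvC2 (l.count k))).sum

-- the prefix-state key both programs compute from the updated counters
def pvKey (zc oc tc : Int) (s : Char) : Int × Int :=
  ((if s = '0' then zc + 1 else zc) - (if s = '0' then oc else if s = '1' then oc + 1 else oc),
   (if s = '0' then zc + 1 else zc) - (if s = '0' then tc else if s = '1' then tc else tc + 1))

-- proof-side fold: the bare list of prefix-state keys
def pvKeysStep (st : List (Int × Int) × Int × Int × Int) (s : Char) :
    List (Int × Int) × Int × Int × Int :=
  let ks := st.1; let zc := st.2.1; let oc := st.2.2.1; let tc := st.2.2.2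
  (ks ++ [pvKey zc oc tc s],
   (if s = '0' then zc + 1 else zc),
   (if s = '0' then oc else if s = '1' then oc + 1 else oc),
   (if s = '0' then tc else if s = '1' then tc else tc + 1))

def pvEnc (base : Int) (p : Int × Int) : Int := p.1 * base + p.2

theorem pvC2_succ (f : Int) : pvC2 (f + 1) = pvC2 f + f := by
  unfold pvC2
  rw [PySem.Int.floordiv_eq_ediv_of_pos (by omega), PySem.Int.floordiv_eq_ediv_of_pos (by omega)]
  have h : (f + 1) * (f + 1 - 1) = f * (f - 1) + 2 * f := by ring
  omega

-- A's branchy dict update collapses to the counter step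
theorem pvA_dict_eq (d : PySem.Dict (Int × Int) Int) (k : Int × Int) :
    (if d.contains k then d.insert k (1 + d.getD k 0) else d.insert k 1)
      = d.insert k (d.getD k 0 + 1) := by
  by_cases hc : d.contains k = true
  · simp [hc, add_comm]
  · have hc' : d.contains k = false := by simpa using hc
    rw [if_neg (by simp [hc']), PySem.Dict.getD_of_not_contains d 0 hc']
    norm_num

theorem pvA_count_eq (d : PySem.Dict (Int × Int) Int) (k : Int × Int) (count : Int) :
    (if d.contains k = false then count + 0 else count + d.getD k 0)
      = count + d.getD k 0 := by
  by_cases hc : d.contains k = true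
  · simp [hc]
  · have hc' : d.contains k = false := by simpa using hc
    rw [if_pos hc', PySem.Dict.getD_of_not_contains d 0 hc']

theorem pvAStep_eq (d : PySem.Dict (Int × Int) Int) (count zc oc tc : Int) (s : Char) :
    pvAStep (d, count, zc, oc, tc) s
      = (d.insert (pvKey zc oc tc s) (d.getD (pvKey zc oc tc s) 0 + 1),
         count + d.getD (pvKey zc oc tc s) 0,
         (if s = '0' then zc + 1 else zc),
         (if s = '0' then oc else if s = '1' then oc + 1 else oc),
         (if s = '0' then tc else if s = '1' then tc else tc + 1)) := by
  simp only [pvAStep, pvKey, pvA_dict_eq, pvA_count_eq]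

-- counter of one more element
theorem pvCounter_append (ks : List (Int × Int)) (k : Int × Int) :
    PySem.Dict.counter (ks ++ [k])
      = (PySem.Dict.counter ks).insert k ((PySem.Dict.counter ks).getD k 0 + 1) := by
  rw [← PySem.Dict.foldl_insert_getD_add_one_eq_counter, List.foldl_append,
    PySem.Dict.foldl_insert_getD_add_one_eq_counter]
  simp

-- sum over distinct elements is determined by Nodup + membership
theorem pvSum_nodup_congr {α : Type} (D1 D2 : List α) (f : α → Int)
    (h1 : D1.Nodup) (h2 : D2.Nodup) (hm : ∀ x, x ∈ D1 ↔ x ∈ D2) :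
    (D1.map f).sum = (D2.map f).sum := by
  have hp : D1.Perm D2 := (List.perm_ext_iff_of_nodup h1 h2).mpr hm
  exact (hp.map f).sum_eq

-- updating the summand at one element of a Nodup list shifts the sum by the update
theorem pvSum_update {α : Type} (D : List α) (f g : α → Int) (k : α) (c : Int)
    (hnd : D.Nodup) (hk : k ∈ D) (hfk : f k = g k + c)
    (hother : ∀ x ∈ D, x ≠ k → f x = g x) :
    (D.map f).sum = (D.map g).sum + c := by
  induction D with
  | nil => simp at hk
  | cons x t ih =>
    simp only [List.nodup_cons] at hnd
    rcases List.mem_cons.mp hk with h | h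
    · subst h
      have ht : t.map f = t.map g := List.map_congr_left (fun y hy =>
        hother y (List.mem_cons_of_mem _ hy) (fun he => hnd.1 (he ▸ hy)))
      simp only [List.map_cons, List.sum_cons, ht, hfk]
      ring
    · have hx : x ≠ k := fun he => hnd.1 (he ▸ h)
      simp only [List.map_cons, List.sum_cons,
        ih hnd.2 h (fun y hy hyk => hother y (List.mem_cons_of_mem _ hy) hyk),
        hother x (List.mem_cons_self) hx]
      ring

-- appending one element raises the groups sum by the old multiplicity
theorem pvGroupsSum_append (M : List (Int × Int)) (k : Int × Int) :
    pvGroupsSum (M ++ [k]) = pvGroupsSum M + M.count k := by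
  unfold pvGroupsSum
  have hcnt : ∀ x : Int × Int, (M ++ [k]).count x = M.count x + (if x = k then 1 else 0) := by
    intro x
    simp only [List.count_append, List.count_cons, List.count_nil, beq_iff_eq]
    by_cases hxk : x = k
    · simp [hxk]
    · simp [hxk, Ne.symm hxk]
  by_cases hk : k ∈ M
  · have h1 : ((PySem.List.dedup (M ++ [k])).map
        (fun x => pvC2 ((M ++ [k]).count x))).sum
        = ((PySem.List.dedup M).map (fun x => pvC2 ((M ++ [k]).count x))).sum := by
      apply pvSum_nodup_congr _ _ _ (PySem.List.nodup_dedup _) (PySem.List.nodup_dedup _)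
      intro x
      rw [PySem.List.mem_dedup, PySem.List.mem_dedup, List.mem_append, List.mem_singleton]
      constructor
      · rintro (h | rfl)
        · exact h
        · exact hk
      · exact Or.inl
    rw [h1]
    apply pvSum_update _ _ _ k _ (PySem.List.nodup_dedup _)
      ((PySem.List.mem_dedup _ _).mpr hk)
    · rw [hcnt k, if_pos rfl]
      push_cast
      rw [pvC2_succ]
    · intro x _ hx
      rw [hcnt x, if_neg hx]
      simp
  · have h1 : ((PySem.List.dedup (M ++ [k])).map
        (fun x => pvC2 ((M ++ [k]).count x))).sum
        = (((PySem.List.dedup M) ++ [k]).map (fun x => pvC2 ((M ++ [k]).count x))).sum := by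
      apply pvSum_nodup_congr _ _ _ (PySem.List.nodup_dedup _)
      · have hkd : k ∉ PySem.List.dedup M := fun h => hk ((PySem.List.mem_dedup _ _).mp h)
        simp only [List.nodup_append, List.nodup_singleton]
        refine ⟨PySem.List.nodup_dedup _, trivial, ?_⟩
        intro a hab b hb
        rw [List.mem_singleton] at hb
        subst hb
        exact fun he => hk (he ▸ ((PySem.List.mem_dedup _ _).mp hab))
      · intro x
        rw [PySem.List.mem_dedup, List.mem_append, List.mem_append,
          PySem.List.mem_dedup]
    rw [h1, List.map_append, List.sum_append]
    have hck : (M ++ [k]).count k = 1 := by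
      rw [hcnt k, if_pos rfl, List.count_eq_zero.mpr hk]
    have hkk : ([k].map (fun x => pvC2 ((M ++ [k]).count x))).sum = 0 := by
      simp only [List.map_cons, List.map_nil, List.sum_cons, List.sum_nil, hck]
      decide
    rw [hkk]
    have h2 : (PySem.List.dedup M).map (fun x => pvC2 ((M ++ [k]).count x))
        = (PySem.List.dedup M).map (fun x => pvC2 (M.count x)) := by
      apply List.map_congr_left
      intro x hx
      have hxk : x ≠ k := fun he => hk (he ▸ (PySem.List.mem_dedup _ _).mp hx)
      rw [hcnt x, if_neg hxk]
      simp
    rw [h2, List.count_eq_zero.mpr hk]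
    push_cast
    ring

-- A's loop invariant: dict = counter of the keys so far, count = pvGroupsSum of the keys so far
theorem pvA_loop (l : List Char) :
    ∀ (ks : List (Int × Int)) (zc oc tc : Int),
    (l.foldl pvAStep (PySem.Dict.counter ks, pvGroupsSum ks, zc, oc, tc))
      = (PySem.Dict.counter ((l.foldl pvKeysStep (ks, zc, oc, tc)).1),
         pvGroupsSum ((l.foldl pvKeysStep (ks, zc, oc, tc)).1),
         (l.foldl pvKeysStep (ks, zc, oc, tc)).2) := by
  induction l with
  | nil => intro ks zc oc tc; rfl
  | cons s t ih =>
    intro ks zc oc tc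
    rw [List.foldl_cons, List.foldl_cons, pvAStep_eq, ← pvCounter_append,
      PySem.Dict.getD_counter, ← pvGroupsSum_append]
    exact ih (ks ++ [pvKey zc oc tc s]) _ _ _

-- B's first loop produces exactly the encoded key list
theorem pvB_loop (base : Int) (l : List Char) :
    ∀ (ks : List (Int × Int)) (zc oc tc : Int),
    l.foldl (pvBStep base) (ks.map (pvEnc base), zc, oc, tc)
      = (((l.foldl pvKeysStep (ks, zc, oc, tc)).1).map (pvEnc base),
         (l.foldl pvKeysStep (ks, zc, oc, tc)).2) := by
  induction l with
  | nil => intro ks zc oc tc; rfl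
  | cons s t ih =>
    intro ks zc oc tc
    rw [List.foldl_cons, List.foldl_cons]
    have hstep : pvBStep base (ks.map (pvEnc base), zc, oc, tc) s
        = ((ks ++ [pvKey zc oc tc s]).map (pvEnc base),
           (if s = '0' then zc + 1 else zc),
           (if s = '0' then oc else if s = '1' then oc + 1 else oc),
           (if s = '0' then tc else if s = '1' then tc else tc + 1)) := by
      simp [pvBStep, pvKey, pvEnc]
    rw [hstep]
    exact ih (ks ++ [pvKey zc oc tc s]) _ _ _

-- the groups sum is invariant under permutation
theorem pvGroupsSum_perm (L L' : List Int) (h : L.Perm L') : pvGroupsSum L = pvGroupsSum L' := by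
  unfold pvGroupsSum
  have h1 : (PySem.List.dedup L).map (fun k => pvC2 (L.count k))
      = (PySem.List.dedup L).map (fun k => pvC2 (L'.count k)) := by
    apply List.map_congr_left
    intro x _
    rw [h.count_eq]
  rw [h1]
  apply pvSum_nodup_congr _ _ _ (PySem.List.nodup_dedup _) (PySem.List.nodup_dedup _)
  intro x
  rw [PySem.List.mem_dedup, PySem.List.mem_dedup]
  exact h.mem_iff

-- count of an image element in a mapped list, as a countP over the source
theorem pvCount_map {α β : Type} [BEq β] [LawfulBEq β] (f : α → β) (a : β) (M : List α) :
    (M.map f).count a = M.countP (fun x => f x == a) := by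
  induction M with
  | nil => simp
  | cons x t ih =>
    simp only [List.map_cons, List.count_cons, List.countP_cons, ih]

-- the groups sum is invariant under an injective-on-members encoding
theorem pvGroupsSum_map (M : List (Int × Int)) (f : (Int × Int) → Int)
    (hinj : ∀ x ∈ M, ∀ y ∈ M, f x = f y → x = y) :
    pvGroupsSum (M.map f) = pvGroupsSum M := by
  unfold pvGroupsSum
  have hcnt : ∀ k ∈ M, (M.map f).count (f k) = M.count k := by
    intro k hk
    rw [pvCount_map]
    have h2 : M.countP (fun x => f x == f k) = M.countP (fun x => x == k) := by
      apply List.countP_congr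
      intro x hx
      by_cases hxk : x = k
      · simp [hxk]
      · have hfx : f x ≠ f k := fun he => hxk (hinj x hx k hk he)
        simp [hxk, hfx]
    rw [h2, ← List.count_eq_countP]
  have hd : ((PySem.List.dedup (M.map f)).map (fun c => pvC2 ((M.map f).count c))).sum
      = (((PySem.List.dedup M).map f).map (fun c => pvC2 ((M.map f).count c))).sum := by
    apply pvSum_nodup_congr _ _ _ (PySem.List.nodup_dedup _)
    · exact List.Nodup.map_on
        (fun x hx y hy hxy =>
          hinj x ((PySem.List.mem_dedup _ _).mp hx) y ((PySem.List.mem_dedup _ _).mp hy) hxy)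
        (PySem.List.nodup_dedup _)
    · intro c
      rw [PySem.List.mem_dedup]
      simp only [List.mem_map, PySem.List.mem_dedup]
  rw [hd, List.map_map]
  apply congrArg
  apply List.map_congr_left
  intro k hk
  simp only [Function.comp_apply]
  rw [hcnt k ((PySem.List.mem_dedup _ _).mp hk)]

-- all keys produced by the fold are bounded by the number of characters consumed
theorem pvKeys_bound (N : Int) (l : List Char) :
    ∀ (ks : List (Int × Int)) (zc oc tc : Int),
    0 ≤ zc → 0 ≤ oc → 0 ≤ tc →
    (∀ p ∈ ks, -N ≤ p.1 ∧ p.1 ≤ N ∧ -N ≤ p.2 ∧ p.2 ≤ N) →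
    zc + oc + tc + l.length ≤ N →
    ∀ p ∈ (l.foldl pvKeysStep (ks, zc, oc, tc)).1,
      -N ≤ p.1 ∧ p.1 ≤ N ∧ -N ≤ p.2 ∧ p.2 ≤ N := by
  induction l with
  | nil => intro ks zc oc tc _ _ _ hks _; simpa using hks
  | cons s t ih =>
    intro ks zc oc tc hz ho ht hks hlen
    rw [List.foldl_cons]
    simp only [List.length_cons] at hlen
    show ∀ p ∈ (t.foldl pvKeysStep (ks ++ [pvKey zc oc tc s],
      (if s = '0' then zc + 1 else zc),
      (if s = '0' then oc else if s = '1' then oc + 1 else oc),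
      (if s = '0' then tc else if s = '1' then tc else tc + 1))).1,
      -N ≤ p.1 ∧ p.1 ≤ N ∧ -N ≤ p.2 ∧ p.2 ≤ N
    refine ih (ks ++ [pvKey zc oc tc s]) _ _ _ ?_ ?_ ?_ ?_ ?_
    · split <;> omega
    · split
      · omega
      · split <;> omega
    · split
      · omega
      · split <;> omega
    · intro p hp
      rcases List.mem_append.mp hp with h | h
      · exact hks p h
      · rw [List.mem_singleton] at h
        subst h
        unfold pvKey
        push_cast at hlen
        refine ⟨?_, ?_, ?_, ?_⟩ <;> dsimp only <;> split <;> (try split) <;> omega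
    · push_cast at hlen ⊢
      split <;> (try split) <;> omega

-- run absorption: equal codes only increment the run length
theorem pvScan_absorb (a : Int) (r : List Int) (h : ∀ x ∈ r, x = a) :
    ∀ (total run : Int),
    r.foldl pvScanStep (total, some a, run) = (total, some a, run + r.length) := by
  induction r with
  | nil => intro total run; simp
  | cons x t ih =>
    intro total run
    have hx : x = a := h x List.mem_cons_self
    subst hx
    rw [List.foldl_cons]
    have hstep : pvScanStep (total, some x, run) x = (total, some x, run + 1) := by
      simp [pvScanStep]
    rw [hstep, ih (fun y hy => h y (List.mem_cons_of_mem _ hy))]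
    simp only [List.length_cons]
    push_cast
    ring_nf

-- the groups sum of one maximal chunk plus the rest
theorem pvGroupsSum_chunk (a : Int) (r rest : List Int)
    (hr : ∀ x ∈ r, x = a) (ha : a ∉ rest) :
    pvGroupsSum (a :: (r ++ rest)) = pvC2 (1 + r.length) + pvGroupsSum rest := by
  unfold pvGroupsSum
  have hsum : ((PySem.List.dedup (a :: (r ++ rest))).map
        (fun k => pvC2 ((a :: (r ++ rest)).count k))).sum
      = ((a :: PySem.List.dedup rest).map (fun k => pvC2 ((a :: (r ++ rest)).count k))).sum := by
    apply pvSum_nodup_congr _ _ _ (PySem.List.nodup_dedup _)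
    · exact List.nodup_cons.mpr
        ⟨fun h => ha ((PySem.List.mem_dedup _ _).mp h), PySem.List.nodup_dedup _⟩
    · intro x
      rw [PySem.List.mem_dedup]
      simp only [List.mem_cons, List.mem_append, PySem.List.mem_dedup]
      constructor
      · rintro (rfl | h | h)
        · exact Or.inl rfl
        · exact Or.inl (hr x h)
        · exact Or.inr h
      · rintro (rfl | h)
        · exact Or.inl rfl
        · exact Or.inr (Or.inr h)
  rw [hsum, List.map_cons, List.sum_cons]
  have hcr : r.count a = r.length := List.count_eq_length.mpr (fun b hb => (hr b hb).symm)
  have hca : (a :: (r ++ rest)).count a = 1 + r.length := by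
    rw [List.count_cons, List.count_append, hcr, List.count_eq_zero.mpr ha]
    simp [add_comm]
  rw [hca]
  have hrest : (PySem.List.dedup rest).map (fun k => pvC2 ((a :: (r ++ rest)).count k))
      = (PySem.List.dedup rest).map (fun k => pvC2 (rest.count k)) := by
    apply List.map_congr_left
    intro x hx
    have hxa : x ≠ a := fun he => ha (he ▸ (PySem.List.mem_dedup _ _).mp hx)
    have hxr : r.count x = 0 := List.count_eq_zero.mpr
      (fun hxr => hxa (hr x hxr))
    rw [List.count_cons, List.count_append, hxr]
    simp [Ne.symm hxa]
  rw [hrest]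
  push_cast
  ring_nf

-- opening step of the scan: a fresh element starts a run of length 1
theorem pvScan_open (total : Int) (b : Int) :
    pvScanStep (total, none, 0) b = (total, some b, 1) := by
  simp [pvScanStep]

-- scan over a sorted list computes the groups sum (fuel = length bound for the induction)
theorem pvScan_sorted (n : Nat) :
    ∀ (L : List Int), L.length ≤ n → L.Pairwise (· ≤ ·) → ∀ (total : Int),
    (L.foldl pvScanStep (total, none, 0)).1
      + pvC2 (L.foldl pvScanStep (total, none, 0)).2.2 = total + pvGroupsSum L := by
  induction n with
  | zero =>
    intro L hL _ total
    rw [List.eq_nil_of_length_eq_zero (Nat.le_zero.mp hL)]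
    have h0 : pvGroupsSum ([] : List Int) = 0 := by decide
    have h1 : pvC2 0 = 0 := by decide
    simp [h0, h1]
  | succ n ih =>
    intro L hL hp total
    cases L with
    | nil =>
      have h0 : pvGroupsSum ([] : List Int) = 0 := by decide
      have h1 : pvC2 0 = 0 := by decide
      simp [h0, h1]
    | cons a t =>
      rw [List.pairwise_cons] at hp
      have ht : t.takeWhile (fun x => x == a) ++ t.dropWhile (fun x => x == a) = t :=
        List.takeWhile_append_dropWhile
      have hr : ∀ x ∈ t.takeWhile (fun x => x == a), x = a := by
        intro x hx
        simpa using List.mem_takeWhile_imp hx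
      have hrest_pw : (t.dropWhile (fun x => x == a)).Pairwise (· ≤ ·) :=
        List.Pairwise.sublist (List.dropWhile_sublist _) hp.2
      have ha : a ∉ t.dropWhile (fun x => x == a) := by
        cases hrc : t.dropWhile (fun x => x == a) with
        | nil => simp
        | cons b rest' =>
          have hne : t.dropWhile (fun x => x == a) ≠ [] := by simp [hrc]
          have h2 := List.head_dropWhile_not (p := fun x => x == a) (l := t) hne
          have h3 : (t.dropWhile (fun x => x == a)).head hne = b := by simp [hrc]
          rw [h3] at h2
          have hba : b ≠ a := by simpa using h2
          intro hmem
          rw [List.mem_cons] at hmem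
          rcases hmem with h | h
          · exact hba h.symm
          · have hab : a ≤ b := hp.1 b (by
              rw [← ht, hrc]
              exact List.mem_append_right _ List.mem_cons_self)
            have hba' : b ≤ a := by
              rw [hrc, List.pairwise_cons] at hrest_pw
              exact hrest_pw.1 a h
            exact hba (le_antisymm hba' hab)
      rw [List.foldl_cons, pvScan_open, ← ht, List.foldl_append,
        pvScan_absorb a _ hr total 1]
      cases hrc : t.dropWhile (fun x => x == a) with
      | nil =>
        simp only [List.foldl_nil]
        rw [pvGroupsSum_chunk a _ _ hr (by simp)]
        have h0 : pvGroupsSum ([] : List Int) = 0 := by decide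
        rw [h0]
        ring_nf
      | cons b rest' =>
        have hba : b ≠ a := by
          have hne : t.dropWhile (fun x => x == a) ≠ [] := by simp [hrc]
          have h2 := List.head_dropWhile_not (p := fun x => x == a) (l := t) hne
          have h3 : (t.dropWhile (fun x => x == a)).head hne = b := by simp [hrc]
          rw [h3] at h2
          simpa using h2
        rw [List.foldl_cons]
        have hstep : pvScanStep (total, some a, 1 + ((t.takeWhile (fun x => x == a)).length : Int)) b
            = (total + pvC2 (1 + ((t.takeWhile (fun x => x == a)).length : Int)), some b, 1) := by
          simp only [pvScanStep]
          rw [if_neg (by simp [Ne.symm hba])]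
          rfl
        rw [hstep]
        have hfold : rest'.foldl pvScanStep
            (total + pvC2 (1 + ((t.takeWhile (fun x => x == a)).length : Int)), some b, 1)
            = (b :: rest').foldl pvScanStep
            (total + pvC2 (1 + ((t.takeWhile (fun x => x == a)).length : Int)), none, 0) := by
          rw [List.foldl_cons, pvScan_open]
        rw [hfold]
        have hlen : (b :: rest').length ≤ n := by
          have h4 : (b :: rest').length ≤ t.length := by
            rw [← ht, hrc]
            simp
          simp only [List.length_cons] at hL
          omega
        have hpw : (b :: rest').Pairwise (· ≤ ·) := hrc ▸ hrest_pw
        rw [ih (b :: rest') hlen hpw]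
        rw [pvGroupsSum_chunk a _ _ hr (hrc ▸ ha)]
        ring_nf

-- ===== VERDICT (by name: the statement is the Claim_ definition above) =====
theorem getSubstringWithEqual012_spec : Claim_equal_getSubstringWithEqual012 := by
  intro Str _
  unfold Spec_getSubstringWithEqual012 getSubstringWithEqual012 getSubstringWithEqual012_alt
  rw [PySem.Str.len_eq]
  dsimp only
  -- names for the pieces
  have hA := pvA_loop Str.toList [((0 : Int), (0 : Int))] 0 0 0
  rw [show PySem.Dict.counter [((0 : Int), (0 : Int))]
        = PySem.Dict.empty.insert ((0 : Int), (0 : Int)) (1 : Int) from by decide] at hA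
  rw [show pvGroupsSum [((0 : Int), (0 : Int))] = (0 : Int) from by decide] at hA
  rw [hA]
  -- B's code list is the encoded key list
  have hc0 : ([(0 : Int)]) = ([((0 : Int), (0 : Int))].map (pvEnc (2 * (Str.toList.length : Int) + 2))) := by
    simp [pvEnc]
  rw [hc0, pvB_loop]
  dsimp only
  have hfd : ∀ v : Int, PySem.Int.floordiv (v * (v - 1)) 2 = pvC2 v := fun _ => rfl
  rw [hfd]
  -- every key is bounded by the length
  have hb := pvKeys_bound ((Str.toList.length : Int)) Str.toList
    [((0 : Int), (0 : Int))] 0 0 0 le_rfl le_rfl le_rfl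
    (by
      intro p hp
      rw [List.mem_singleton] at hp
      subst hp
      have : (0 : Int) ≤ (Str.toList.length : Int) := Int.natCast_nonneg _
      exact ⟨by omega, by omega, by omega, by omega⟩)
    (by omega)
  -- the encoding is injective on the bounded keys
  have hinj : ∀ x ∈ (Str.toList.foldl pvKeysStep ([((0 : Int), (0 : Int))], 0, 0, 0)).1,
      ∀ y ∈ (Str.toList.foldl pvKeysStep ([((0 : Int), (0 : Int))], 0, 0, 0)).1,
      pvEnc (2 * (Str.toList.length : Int) + 2) x = pvEnc (2 * (Str.toList.length : Int) + 2) y → x = y := by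
    intro x hx y hy he
    obtain ⟨hx1, hx2, hx3, hx4⟩ := hb x hx
    obtain ⟨hy1, hy2, hy3, hy4⟩ := hb y hy
    unfold pvEnc at he
    have hd : (x.1 - y.1) * (2 * (Str.toList.length : Int) + 2) = y.2 - x.2 := by
      linear_combination he
    have hfst : x.1 = y.1 := by
      rcases lt_trichotomy x.1 y.1 with h | h | h
      · exfalso
        have h1 : x.1 - y.1 ≤ -1 := by omega
        have h2 : (x.1 - y.1) * (2 * (Str.toList.length : Int) + 2)
            ≤ (-1) * (2 * (Str.toList.length : Int) + 2) :=
          mul_le_mul_of_nonneg_right h1 (by omega)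
        omega
      · exact h
      · exfalso
        have h1 : (1 : Int) ≤ x.1 - y.1 := by omega
        have h2 : (1 : Int) * (2 * (Str.toList.length : Int) + 2)
            ≤ (x.1 - y.1) * (2 * (Str.toList.length : Int) + 2) :=
          mul_le_mul_of_nonneg_right h1 (by omega)
        omega
    have hsnd : x.2 = y.2 := by
      rw [hfst] at hd
      simp at hd
      omega
    exact Prod.ext hfst hsnd
  -- scan of the sorted codes = groups sum of the keys
  have hpw := PySem.List.sorted_pairwise
    (((Str.toList.foldl pvKeysStep ([((0 : Int), (0 : Int))], 0, 0, 0)).1).map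
      (pvEnc (2 * (Str.toList.length : Int) + 2))) (fun x => x)
  have hscan := pvScan_sorted
    (PySem.List.sorted (((Str.toList.foldl pvKeysStep ([((0 : Int), (0 : Int))], 0, 0, 0)).1).map
      (pvEnc (2 * (Str.toList.length : Int) + 2))) (fun x => x) false).length
    _ le_rfl (by simpa using hpw) 0
  rw [hscan, zero_add,
    pvGroupsSum_perm _ _ (PySem.List.sorted_perm _ _ _),
    pvGroupsSum_map _ _ hinj]
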